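-- pv_equiv track=rewrite | github.com/LyubomirT/intense-rp-next | src/processors/content_processor.py | _remove_em_inside_strong
-- ===== SOURCE A (Python) =====
-- def _remove_em_inside_strong(html: str) -> str:
--     """Remove <em> tags inside <strong> tags"""
--     try:
--         result = []
--         inside_strong = False
--         i = 0
--
--         while i < len(html):
--             if html[i:i+8] == "<strong>":
--                 inside_strong = True
--                 result.append("<strong>")
--                 i += 8
--             elif html[i:i+9] == "</strong>":
--                 inside_strong = False
--                 result.append("</strong>")
--                 i += 9
--             elif html[i:i+4] == "<em>" and inside_strong:
--                 i += 4  # Skip <em>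
--             elif html[i:i+5] == "</em>" and inside_strong:
--                 i += 5  # Skip </em>
--             else:
--                 result.append(html[i])
--                 i += 1
--
--         return "".join(result)
--     except Exception:
--         return html
-- ===== SOURCE B (Python) =====
-- def _remove_em_inside_strong(html: str) -> str:
--     """Remove <em> tags inside <strong> tags"""
--     try:
--         TAGS = ("<strong>", "</strong>", "<em>", "</em>")
--         # Pass 1: tokenize into text chunks and tag tokens, jumping to each '<' with str.find.
--         parts = []
--         pos = 0
--         while True:
--             j = html.find("<", pos)
--             if j == -1:
--                 parts.append(html[pos:])
--                 break
--             for t in TAGS: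
--                 if html.startswith(t, j):
--                     parts.append(html[pos:j])
--                     parts.append(t)
--                     pos = j + len(t)
--                     break
--             else:
--                 parts.append(html[pos:j + 1])
--                 pos = j + 1
--         # Pass 2: keep every token except em tags seen while inside <strong>.
--         out = []
--         inside = False
--         for part in parts:
--             if part == "<strong>":
--                 inside = True
--                 out.append(part)
--             elif part == "</strong>":
--                 inside = False
--                 out.append(part)
--             elif part == "<em>" or part == "</em>":
--                 if not inside:
--                     out.append(part)
--             else:
--                 out.append(part)
--         return "".join(out)
--     except Exception:
--         return html
-- ===== Notes on version B (the rewrite author's own statement) =====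
-- stated objective: faster
-- what changed: Replaces A's per-character scan (which slices and compares up to four candidate tags at every index) by a two-pass pipeline: pass 1 tokenizes the string by jumping straight to each tag-opening character with str.find and copying the text between in bulk, pass 2 folds over the token list with the inside_strong flag, dropping em tokens seen inside strong.
import Mathlib
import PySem

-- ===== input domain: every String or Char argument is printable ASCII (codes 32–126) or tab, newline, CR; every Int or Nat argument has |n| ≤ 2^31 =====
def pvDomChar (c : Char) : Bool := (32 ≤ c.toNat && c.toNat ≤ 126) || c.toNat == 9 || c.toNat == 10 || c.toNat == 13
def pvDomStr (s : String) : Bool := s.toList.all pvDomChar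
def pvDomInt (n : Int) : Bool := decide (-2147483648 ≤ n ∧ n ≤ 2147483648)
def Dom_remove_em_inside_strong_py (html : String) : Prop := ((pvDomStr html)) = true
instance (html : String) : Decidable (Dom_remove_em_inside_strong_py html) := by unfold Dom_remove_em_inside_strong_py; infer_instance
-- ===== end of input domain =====

-- B replaces A's per-character scan by a two-pass pipeline (find-based tokenizer, then a
-- fold over tokens with the inside_strong flag); measurably faster in CPython by a constant factor.

-- ===== PORT A =====
-- The four literal tags, shared by both ports.
def pvTagS : List Char := ['<', 's', 't', 'r', 'o', 'n', 'g', '>']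
def pvTagCS : List Char := ['<', '/', 's', 't', 'r', 'o', 'n', 'g', '>']
def pvTagE : List Char := ['<', 'e', 'm', '>']
def pvTagCE : List Char := ['<', '/', 'e', 'm', '>']

-- A's while-loop over index i, transcribed on the remaining suffix: html[i:i+k] == tag
-- is s.take k = tag, i += k is s.drop k; the appended pieces are emitted directly.
def pvGoA (ins : Bool) (s : List Char) : List Char :=
  if h1 : s.take 8 = pvTagS then
    pvTagS ++ pvGoA true (s.drop 8)
  else if h2 : s.take 9 = pvTagCS then
    pvTagCS ++ pvGoA false (s.drop 9)
  else if h3 : s.take 4 = pvTagE ∧ ins = true then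
    pvGoA ins (s.drop 4)
  else if h4 : s.take 5 = pvTagCE ∧ ins = true then
    pvGoA ins (s.drop 5)
  else
    match s with
    | [] => []
    | c :: rest => c :: pvGoA ins rest
termination_by s.length
decreasing_by
  · have := congrArg List.length h1
    simp [pvTagS] at this
    simp; omega
  · have := congrArg List.length h2
    simp [pvTagCS] at this
    simp; omega
  · have := congrArg List.length h3.1
    simp [pvTagE] at this
    simp; omega
  · have := congrArg List.length h4.1
    simp [pvTagCE] at this
    simp; omega
  · simp

def remove_em_inside_strong_py (html : String) : String :=
  String.ofList (pvGoA false html.toList)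

-- ===== PORT B =====
def pvTAGS : List (List Char) := [pvTagS, pvTagCS, pvTagE, pvTagCE]

-- B's pass 1: html.find("<", pos) / html.startswith(t, j), transcribed on the remaining
-- suffix (find is relative, startswith at j is startswith on the dropped suffix); the
-- `for t in TAGS: … break / else` is List.find?.
def pvTokenize (rest : List Char) : List (List Char) :=
  let j := PySem.Chars.find rest ['<']
  if h0 : j = -1 then
    [rest]
  else
    match hf : pvTAGS.find? (fun t => PySem.Chars.startswith (rest.drop j.toNat) t) with
    | some t => rest.take j.toNat :: t :: pvTokenize ((rest.drop j.toNat).drop t.length)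
    | none => rest.take (j.toNat + 1) :: pvTokenize (rest.drop (j.toNat + 1))
termination_by rest.length
decreasing_by
  all_goals
    have hj0 : 0 ≤ PySem.Chars.find rest ['<'] := by
      have := PySem.Chars.neg_one_le_find rest ['<']
      omega
    have hsp := (PySem.Chars.find_spec hj0).1
    have hlt : (PySem.Chars.find rest ['<']).toNat < rest.length := by
      have h1 := hsp.length_le
      simp at h1
      omega
  · have ht : t ∈ pvTAGS := List.mem_of_find?_eq_some hf
    have htl : 0 < t.length := by
      simp [pvTAGS] at ht
      rcases ht with rfl | rfl | rfl | rfl <;> simp [pvTagS, pvTagCS, pvTagE, pvTagCE]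
    simp; omega
  · simp; omega

-- B's pass 2: the for-loop over parts with the inside_strong flag.
def pvProcess (ins : Bool) (parts : List (List Char)) : List Char :=
  match parts with
  | [] => []
  | p :: ps =>
    if p = pvTagS then p ++ pvProcess true ps
    else if p = pvTagCS then p ++ pvProcess false ps
    else if p = pvTagE ∨ p = pvTagCE then
      (if ins = true then pvProcess ins ps else p ++ pvProcess ins ps)
    else p ++ pvProcess ins ps

def remove_em_inside_strong_py_alt (html : String) : String :=
  String.ofList (pvProcess false (pvTokenize html.toList))

-- ===== PRECONDITION & SPEC =====
def Spec_remove_em_inside_strong_py (html : String) (out : String) : Prop := out = remove_em_inside_strong_py_alt html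
instance (html : String) (out : String) : Decidable (Spec_remove_em_inside_strong_py html out) := by unfold Spec_remove_em_inside_strong_py; infer_instance

-- ===== CLAIM (what is proved, stated in full; the proofs are below) =====
def Claim_equal_remove_em_inside_strong_py : Prop := ∀ (html : String), Dom_remove_em_inside_strong_py html → Spec_remove_em_inside_strong_py html (remove_em_inside_strong_py html)

-- ===== LEMMAS AND PROOFS =====

theorem pvGoA_nil (ins : Bool) : pvGoA ins [] = [] := by
  rw [pvGoA]
  simp [pvTagS, pvTagCS, pvTagE, pvTagCE]

-- A copies characters one by one as long as no tag (hence no '<') starts.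
theorem pvGoA_copy (ins : Bool) (pre suf : List Char) (h : '<' ∉ pre) :
    pvGoA ins (pre ++ suf) = pre ++ pvGoA ins suf := by
  induction pre with
  | nil => simp
  | cons c pre' ih =>
    have hc : c ≠ '<' := by intro hc; exact h (hc ▸ List.mem_cons_self)
    have h' : '<' ∉ pre' := fun hm => h (List.mem_cons_of_mem _ hm)
    rw [List.cons_append, pvGoA]
    rw [dif_neg (by intro he; simp [List.take_succ_cons, pvTagS] at he; exact hc he.1)]
    rw [dif_neg (by intro he; simp [List.take_succ_cons, pvTagCS] at he; exact hc he.1)]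
    rw [dif_neg (by rintro ⟨he, -⟩; simp [List.take_succ_cons, pvTagE] at he; exact hc he.1)]
    rw [dif_neg (by rintro ⟨he, -⟩; simp [List.take_succ_cons, pvTagCE] at he; exact hc he.1)]
    simpa using ih h'

-- A text chunk with no '<' equals none of the four tags.
theorem pvNoLt_ne_tags (p : List Char) (h : '<' ∉ p) :
    p ≠ pvTagS ∧ p ≠ pvTagCS ∧ p ≠ pvTagE ∧ p ≠ pvTagCE := by
  refine ⟨?_, ?_, ?_, ?_⟩ <;> rintro rfl <;>
    simp [pvTagS, pvTagCS, pvTagE, pvTagCE] at h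

-- A chunk ending in '<' equals none of the four tags (they all end in '>').
theorem pvSnoc_ne_tags (p : List Char) :
    p ++ ['<'] ≠ pvTagS ∧ p ++ ['<'] ≠ pvTagCS ∧ p ++ ['<'] ≠ pvTagE ∧ p ++ ['<'] ≠ pvTagCE := by
  refine ⟨?_, ?_, ?_, ?_⟩ <;> intro he <;>
    · have := congrArg List.getLast? he
      simp [pvTagS, pvTagCS, pvTagE, pvTagCE] at this

-- Minimality of find turns into: no '<' in the copied chunk.
theorem pvNoLt_take (l : List Char) (n : Nat)
    (hmin : ∀ i < n, ¬ (['<'] <+: l.drop i)) : '<' ∉ l.take n := by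
  intro hm
  obtain ⟨i, hi, hEq⟩ := List.getElem_of_mem hm
  have hin : i < n := by simp at hi; omega
  have hil : i < l.length := by simp at hi; omega
  refine hmin i hin ?_
  rw [List.drop_eq_getElem_cons hil]
  have : l[i] = '<' := by rw [← hEq]; simp
  rw [this]
  exact ⟨l.drop (i + 1), rfl⟩

-- One step of B's pass 2, for a text chunk and for each tag token.
theorem pvProcess_text (ins : Bool) (p : List Char) (ps : List (List Char))
    (h1 : p ≠ pvTagS) (h2 : p ≠ pvTagCS) (h3 : p ≠ pvTagE) (h4 : p ≠ pvTagCE) :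
    pvProcess ins (p :: ps) = p ++ pvProcess ins ps := by
  simp only [pvProcess]
  rw [if_neg h1, if_neg h2, if_neg (not_or.mpr ⟨h3, h4⟩)]

theorem pvProcess_tagS (ins : Bool) (ps : List (List Char)) :
    pvProcess ins (pvTagS :: ps) = pvTagS ++ pvProcess true ps := by
  simp [pvProcess]

theorem pvProcess_tagCS (ins : Bool) (ps : List (List Char)) :
    pvProcess ins (pvTagCS :: ps) = pvTagCS ++ pvProcess false ps := by
  simp [pvProcess, pvTagS, pvTagCS]

theorem pvProcess_tagE_true (ps : List (List Char)) :
    pvProcess true (pvTagE :: ps) = pvProcess true ps := by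
  simp [pvProcess, pvTagS, pvTagCS, pvTagE, pvTagCE]

theorem pvProcess_tagE_false (ps : List (List Char)) :
    pvProcess false (pvTagE :: ps) = pvTagE ++ pvProcess false ps := by
  simp [pvProcess, pvTagS, pvTagCS, pvTagE, pvTagCE]

theorem pvProcess_tagCE_true (ps : List (List Char)) :
    pvProcess true (pvTagCE :: ps) = pvProcess true ps := by
  simp [pvProcess, pvTagS, pvTagCS, pvTagE, pvTagCE]

theorem pvProcess_tagCE_false (ps : List (List Char)) :
    pvProcess false (pvTagCE :: ps) = pvTagCE ++ pvProcess false ps := by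
  simp [pvProcess, pvTagS, pvTagCS, pvTagE, pvTagCE]

-- One step of A's scan at each of the four tags (for <em>/</em> outside strong,
-- A copies the tag character by character).
theorem pvGoA_tagS (ins : Bool) (r2 : List Char) :
    pvGoA ins (pvTagS ++ r2) = pvTagS ++ pvGoA true r2 := by
  rw [pvGoA]
  rw [dif_pos (by rw [show (8 : Nat) = pvTagS.length from rfl]; exact List.take_left)]
  rw [show (pvTagS ++ r2).drop 8 = r2 from by
    rw [show (8 : Nat) = pvTagS.length from rfl]; exact List.drop_left]

theorem pvGoA_tagCS (ins : Bool) (r2 : List Char) :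
    pvGoA ins (pvTagCS ++ r2) = pvTagCS ++ pvGoA false r2 := by
  rw [pvGoA]
  rw [dif_neg (by intro he; simp [pvTagCS, pvTagS, List.take_succ_cons] at he)]
  rw [dif_pos (by rw [show (9 : Nat) = pvTagCS.length from rfl]; exact List.take_left)]
  rw [show (pvTagCS ++ r2).drop 9 = r2 from by
    rw [show (9 : Nat) = pvTagCS.length from rfl]; exact List.drop_left]

theorem pvGoA_tagE_true (r2 : List Char) :
    pvGoA true (pvTagE ++ r2) = pvGoA true r2 := by
  rw [pvGoA]
  rw [dif_neg (by intro he; simp [pvTagE, pvTagS, List.take_succ_cons] at he)]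
  rw [dif_neg (by intro he; simp [pvTagE, pvTagCS, List.take_succ_cons] at he)]
  rw [dif_pos ⟨by rw [show (4 : Nat) = pvTagE.length from rfl]; exact List.take_left, rfl⟩]
  rw [show (pvTagE ++ r2).drop 4 = r2 from by
    rw [show (4 : Nat) = pvTagE.length from rfl]; exact List.drop_left]

theorem pvGoA_tagE_false (r2 : List Char) :
    pvGoA false (pvTagE ++ r2) = pvTagE ++ pvGoA false r2 := by
  rw [pvGoA]
  rw [dif_neg (by intro he; simp [pvTagE, pvTagS, List.take_succ_cons] at he)]
  rw [dif_neg (by intro he; simp [pvTagE, pvTagCS, List.take_succ_cons] at he)]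
  rw [dif_neg (by rintro ⟨-, he⟩; exact absurd he (by decide))]
  rw [dif_neg (by rintro ⟨-, he⟩; exact absurd he (by decide))]
  show '<' :: pvGoA false ('e' :: 'm' :: '>' :: r2) = _
  rw [show ('e' :: 'm' :: '>' :: r2) = ['e', 'm', '>'] ++ r2 from rfl,
    pvGoA_copy false _ _ (by decide)]
  rfl

theorem pvGoA_tagCE_true (r2 : List Char) :
    pvGoA true (pvTagCE ++ r2) = pvGoA true r2 := by
  rw [pvGoA]
  rw [dif_neg (by intro he; simp [pvTagCE, pvTagS, List.take_succ_cons] at he)]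
  rw [dif_neg (by intro he; simp [pvTagCE, pvTagCS, List.take_succ_cons] at he)]
  rw [dif_neg (by rintro ⟨he, -⟩; simp [pvTagCE, pvTagE, List.take_succ_cons] at he)]
  rw [dif_pos ⟨by rw [show (5 : Nat) = pvTagCE.length from rfl]; exact List.take_left, rfl⟩]
  rw [show (pvTagCE ++ r2).drop 5 = r2 from by
    rw [show (5 : Nat) = pvTagCE.length from rfl]; exact List.drop_left]

theorem pvGoA_tagCE_false (r2 : List Char) :
    pvGoA false (pvTagCE ++ r2) = pvTagCE ++ pvGoA false r2 := by
  rw [pvGoA]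
  rw [dif_neg (by intro he; simp [pvTagCE, pvTagS, List.take_succ_cons] at he)]
  rw [dif_neg (by intro he; simp [pvTagCE, pvTagCS, List.take_succ_cons] at he)]
  rw [dif_neg (by rintro ⟨-, he⟩; exact absurd he (by decide))]
  rw [dif_neg (by rintro ⟨-, he⟩; exact absurd he (by decide))]
  show '<' :: pvGoA false ('/' :: 'e' :: 'm' :: '>' :: r2) = _
  rw [show ('/' :: 'e' :: 'm' :: '>' :: r2) = ['/', 'e', 'm', '>'] ++ r2 from rfl,
    pvGoA_copy false _ _ (by decide)]
  rfl

theorem pvMain : ∀ (n : Nat) (rest : List Char), rest.length ≤ n → ∀ ins,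
    pvProcess ins (pvTokenize rest) = pvGoA ins rest := by
  intro n
  induction n with
  | zero =>
    intro rest hlen ins
    have hnil : rest = [] := List.length_eq_zero_iff.1 (by omega)
    subst hnil
    have hf : PySem.Chars.find [] ['<'] = -1 := by
      rw [PySem.Chars.find_eq_neg_one_iff]; simp
    rw [pvTokenize]
    simp [hf, pvProcess, pvGoA_nil, pvTagS, pvTagCS, pvTagE, pvTagCE]
  | succ n ih =>
    intro rest hlen ins
    by_cases h0 : PySem.Chars.find rest ['<'] = -1
    · -- no '<' at all: a single text chunk, copied verbatim by both sides
      have hnm : '<' ∉ rest := by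
        have hni := (PySem.Chars.find_eq_neg_one_iff rest ['<']).1 h0
        exact fun hm => hni ((List.singleton_infix_iff '<' rest).2 hm)
      obtain ⟨hne1, hne2, hne3, hne4⟩ := pvNoLt_ne_tags rest hnm
      have hA : pvGoA ins rest = rest := by
        have h2 := pvGoA_copy ins rest [] hnm
        simpa [pvGoA_nil] using h2
      rw [pvTokenize]
      simp [h0, pvProcess, hne1, hne2, hne3, hne4, hA]
    · have hj0 : 0 ≤ PySem.Chars.find rest ['<'] := by
        have := PySem.Chars.neg_one_le_find rest ['<']
        omega
      obtain ⟨hpre, hmin⟩ := PySem.Chars.find_spec hj0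
      set jN := (PySem.Chars.find rest ['<']).toNat with hjN
      have hlt : jN < rest.length := by
        have := hpre.length_le
        simp at this
        omega
      obtain ⟨tail, htail⟩ : ∃ tail, rest.drop jN = '<' :: tail := by
        obtain ⟨u, hu⟩ := hpre
        exact ⟨u, hu.symm⟩
      have htake : '<' ∉ rest.take jN := pvNoLt_take rest jN hmin
      obtain ⟨hne1, hne2, hne3, hne4⟩ := pvNoLt_ne_tags _ htake
      rw [pvTokenize]
      rw [dif_neg h0]
      rw [← hjN]
      split
      case _ t heq =>
        -- a tag starts at the found '<'
        have ht : t ∈ pvTAGS := List.mem_of_find?_eq_some heq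
        have hsw := List.find?_some heq
        have hpref : t <+: rest.drop jN := (PySem.Chars.startswith_iff _ _).1 hsw
        obtain ⟨r2, hr2⟩ := hpref
        have hdrop2 : (rest.drop jN).drop t.length = r2 := by
          rw [← hr2]; exact List.drop_left
        have hlen2 : jN + t.length + r2.length = rest.length := by
          have h3 := congrArg List.length hr2
          simp at h3
          omega
        rw [hdrop2]
        conv_rhs => rw [← List.take_append_drop jN rest, pvGoA_copy ins _ _ htake, ← hr2]
        simp only [pvTAGS] at ht
        simp only [List.mem_cons, List.not_mem_nil, or_false] at ht
        rcases ht with rfl | rfl | rfl | rfl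
        · -- <strong>
          have hr2n : r2.length ≤ n := by simp [pvTagS] at hlen2; omega
          rw [pvProcess_text _ _ _ hne1 hne2 hne3 hne4, pvProcess_tagS,
            ih r2 hr2n true, pvGoA_tagS]
        · -- </strong>
          have hr2n : r2.length ≤ n := by simp [pvTagCS] at hlen2; omega
          rw [pvProcess_text _ _ _ hne1 hne2 hne3 hne4, pvProcess_tagCS,
            ih r2 hr2n false, pvGoA_tagCS]
        · -- <em>
          have hr2n : r2.length ≤ n := by simp [pvTagE] at hlen2; omega
          cases ins with
          | true =>
            rw [pvProcess_text _ _ _ hne1 hne2 hne3 hne4, pvProcess_tagE_true,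
              ih r2 hr2n true, pvGoA_tagE_true]
          | false =>
            rw [pvProcess_text _ _ _ hne1 hne2 hne3 hne4, pvProcess_tagE_false,
              ih r2 hr2n false, pvGoA_tagE_false]
        · -- </em>
          have hr2n : r2.length ≤ n := by simp [pvTagCE] at hlen2; omega
          cases ins with
          | true =>
            rw [pvProcess_text _ _ _ hne1 hne2 hne3 hne4, pvProcess_tagCE_true,
              ih r2 hr2n true, pvGoA_tagCE_true]
          | false =>
            rw [pvProcess_text _ _ _ hne1 hne2 hne3 hne4, pvProcess_tagCE_false,
              ih r2 hr2n false, pvGoA_tagCE_false]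
      case _ heq =>
        -- a bare '<' that starts no tag: copied as an ordinary character
        have hnot : ∀ t ∈ pvTAGS, ¬ t <+: rest.drop jN := by
          intro t ht hp
          have h6 := List.find?_eq_none.1 heq t ht
          exact h6 ((PySem.Chars.startswith_iff _ _).2 hp)
        have hg : rest[jN]? = some '<' := by
          have h4 : (rest.drop jN)[0]? = some '<' := by rw [htail]; rfl
          rwa [List.getElem?_drop, Nat.add_zero] at h4
        have htk1 : rest.take (jN + 1) = rest.take jN ++ ['<'] := by
          rw [List.take_add_one, hg]; rfl
        obtain ⟨hs1, hs2, hs3, hs4⟩ := pvSnoc_ne_tags (rest.take jN)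
        have htail' : tail = rest.drop (jN + 1) := by
          have h5 : (rest.drop jN).drop 1 = rest.drop (jN + 1) := by
            rw [List.drop_drop]
          rw [htail] at h5
          simpa using h5
        have hlenT : (rest.drop (jN + 1)).length ≤ n := by simp; omega
        rw [htk1, pvProcess_text _ _ _ hs1 hs2 hs3 hs4]
        conv_rhs => rw [← List.take_append_drop jN rest, pvGoA_copy ins _ _ htake, htail]
        rw [pvGoA]
        rw [dif_neg (by
          intro he
          exact hnot pvTagS (by simp [pvTAGS])
            (by rw [htail, List.prefix_iff_eq_take, show pvTagS.length = 8 from rfl]; exact he.symm))]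
        rw [dif_neg (by
          intro he
          exact hnot pvTagCS (by simp [pvTAGS])
            (by rw [htail, List.prefix_iff_eq_take, show pvTagCS.length = 9 from rfl]; exact he.symm))]
        rw [dif_neg (by
          rintro ⟨he, -⟩
          exact hnot pvTagE (by simp [pvTAGS])
            (by rw [htail, List.prefix_iff_eq_take, show pvTagE.length = 4 from rfl]; exact he.symm))]
        rw [dif_neg (by
          rintro ⟨he, -⟩
          exact hnot pvTagCE (by simp [pvTAGS])
            (by rw [htail, List.prefix_iff_eq_take, show pvTagCE.length = 5 from rfl]; exact he.symm))]
        subst htail'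
        rw [ih _ hlenT ins]
        simp

-- ===== VERDICT (by name: the statement is the Claim_ definition above) =====
theorem remove_em_inside_strong_py_spec : Claim_equal_remove_em_inside_strong_py := by
  intro html _
  unfold Spec_remove_em_inside_strong_py remove_em_inside_strong_py remove_em_inside_strong_py_alt
  rw [pvMain html.toList.length html.toList le_rfl false]
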